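-- pv_equiv track=rewrite | github.com/dnilsson1/WMS_Demo_amrFleet | wms-demo/backend/services/mission_monitor.py | resolve_order_status
-- ===== SOURCE A (Python) =====
-- TERMINAL_FAILURE_STATUSES = {31, 35, 50, 60}
--
-- TERMINAL_SUCCESS_STATUS = 30
--
-- ACTIVE_STATUSES = {10, 20, 25, 28}
--
-- def resolve_order_status(statuses):
--     if not statuses:
--         return None
--     if any(status in TERMINAL_FAILURE_STATUSES for status in statuses):
--         return "failed"
--     if all(status == TERMINAL_SUCCESS_STATUS for status in statuses):
--         return "completed"
--     if any(status in ACTIVE_STATUSES for status in statuses):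
--         return "picking"
--     return None
-- ===== SOURCE B (Python) =====
-- TERMINAL_FAILURE_STATUSES = {31, 35, 50, 60}
--
-- TERMINAL_SUCCESS_STATUS = 30
--
-- ACTIVE_STATUSES = {10, 20, 25, 28}
--
-- def resolve_order_status(statuses):
--     if not statuses:
--         return None
--     has_failure = False
--     all_success = True
--     has_active = False
--     for s in statuses:
--         if s in TERMINAL_FAILURE_STATUSES:
--             has_failure = True
--         if s != TERMINAL_SUCCESS_STATUS:
--             all_success = False
--         if s in ACTIVE_STATUSES:
--             has_active = True
--     if has_failure:
--         return "failed"
--     if all_success: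
--         return "completed"
--     if has_active:
--         return "picking"
--     return None
-- ===== Notes on version B (the rewrite author's own statement) =====
-- stated objective: alternative
-- what changed: Replaced A's three separate passes (any over failures, all over success, any over active) with one single traversal that threads three boolean flags, applying the same precedence after the loop.
import Mathlib
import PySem

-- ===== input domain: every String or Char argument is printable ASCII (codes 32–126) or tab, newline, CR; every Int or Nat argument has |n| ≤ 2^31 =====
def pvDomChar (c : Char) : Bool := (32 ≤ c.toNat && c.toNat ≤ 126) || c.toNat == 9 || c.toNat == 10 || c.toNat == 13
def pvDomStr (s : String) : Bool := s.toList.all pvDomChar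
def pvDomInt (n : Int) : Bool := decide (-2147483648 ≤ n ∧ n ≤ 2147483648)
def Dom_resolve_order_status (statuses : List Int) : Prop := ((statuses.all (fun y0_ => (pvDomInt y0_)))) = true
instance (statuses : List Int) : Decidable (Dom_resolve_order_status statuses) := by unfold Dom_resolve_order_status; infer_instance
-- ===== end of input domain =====

-- B replaces A's three separate passes over the status list with one single traversal threading three boolean flags; same precedence afterwards (alternative decomposition, same cost).


-- ===== PORT A =====
-- A: guard on empty, then three passes: any failure, all success, any active.
def pvIsFailure (s : Int) : Bool := s == 31 || s == 35 || s == 50 || s == 60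

def pvIsActive (s : Int) : Bool := s == 10 || s == 20 || s == 25 || s == 28

def resolve_order_status (statuses : List Int) : Option String :=
  if statuses.isEmpty then none
  else if statuses.any (fun s => pvIsFailure s) then some "failed"
  else if statuses.all (fun s => s == 30) then some "completed"
  else if statuses.any (fun s => pvIsActive s) then some "picking"
  else none

-- ===== PORT B =====
-- B: one fold over the list maintaining (has_failure, all_success, has_active).
def resolve_order_status_alt (statuses : List Int) : Option String :=
  if statuses.isEmpty then none
  else
    let st := statuses.foldl
      (fun (acc : Bool × Bool × Bool) s =>
        (acc.1 || pvIsFailure s, acc.2.1 && (s == 30), acc.2.2 || pvIsActive s))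
      (false, true, false)
    if st.1 then some "failed"
    else if st.2.1 then some "completed"
    else if st.2.2 then some "picking"
    else none

-- ===== PRECONDITION & SPEC =====
def Spec_resolve_order_status (statuses : List Int) (out : Option String) : Prop := out = resolve_order_status_alt statuses
instance (statuses : List Int) (out : Option String) : Decidable (Spec_resolve_order_status statuses out) := by unfold Spec_resolve_order_status; infer_instance

-- ===== CLAIM (what is proved, stated in full; the proofs are below) =====
def Claim_equal_resolve_order_status : Prop := ∀ (statuses : List Int), Dom_resolve_order_status statuses → Spec_resolve_order_status statuses (resolve_order_status statuses)

-- ===== LEMMAS AND PROOFS =====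

-- The single fold computes exactly the three aggregate booleans A's passes compute.
theorem pv_fold_flags (l : List Int) (f a h : Bool) :
    l.foldl (fun (acc : Bool × Bool × Bool) s =>
        (acc.1 || pvIsFailure s, acc.2.1 && (s == 30), acc.2.2 || pvIsActive s)) (f, a, h)
      = (f || l.any (fun s => pvIsFailure s),
         a && l.all (fun s => s == 30),
         h || l.any (fun s => pvIsActive s)) := by
  induction l generalizing f a h with
  | nil => simp
  | cons x xs ih =>
      simp only [List.foldl_cons, List.any_cons, List.all_cons, ih,
        Bool.or_assoc, Bool.and_assoc]

-- ===== VERDICT (by name: the statement is the Claim_ definition above) =====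
theorem resolve_order_status_spec : Claim_equal_resolve_order_status := by
  intro statuses _
  unfold Spec_resolve_order_status resolve_order_status resolve_order_status_alt
  by_cases he : statuses.isEmpty
  · simp [he]
  · simp only [he, pv_fold_flags, Bool.false_or, Bool.true_and]
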